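-- pv_equiv track=rewrite | github.com/pjaehyun/TIL | PS/leetcode/869.Reordered Power of 2.py | reorderedPowerOf2
-- ===== SOURCE A (Python) =====
-- def reorderedPowerOf2(n: int) -> bool:
--     def count_digits(num):
--         counts = [0] * 10
--         if num == 0:
--             counts[0] = 1
--             return tuple(counts)
--
--         while num > 0:
--             counts[num % 10] += 1
--             num //= 10
--         return tuple(counts)
--
--     n_counts = count_digits(n)
--
--     for i in range(30):
--         power_of_two = 1 << i
--         if count_digits(power_of_two) == n_counts:
--             return True
--
--     return False
-- ===== SOURCE B (Python) =====
-- # B: instead of comparing a digit-count signature of n against every power of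
-- # two, run a pruned backtracking search over the reorderings of n's digits
-- # themselves: build a candidate value most-significant digit first from the
-- # digit multiset (never starting with 0), cut every branch whose smallest
-- # possible completion already exceeds 2**29, and at a full reordering test
-- # "power of two <= 2**29" as divisibility of 2**29 by the candidate.
--
-- def reorderedPowerOf2(n: int) -> bool:
--     if n <= 0:
--         return False
--     counts = [0] * 10
--     total = 0
--     m = n
--     while m > 0:
--         counts[m % 10] += 1
--         total += 1
--         m //= 10
--
--     LIMIT = 1 << 29  # the largest candidate: 30 digit budgets, 2**0 .. 2**29
--
--     def dfs(rem, acc):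
--         # any completion of acc with rem more digits is at least acc * 10**rem
--         if acc * 10 ** rem > LIMIT:
--             return False
--         if rem == 0:
--             return LIMIT % acc == 0  # acc divides 2**29 <=> acc is a power of two <= 2**29
--         for d in range(10):
--             if counts[d] and (acc or d):
--                 counts[d] -= 1
--                 ok = dfs(rem - 1, acc * 10 + d)
--                 counts[d] += 1
--                 if ok:
--                     return True
--         return False
--
--     return dfs(total, 0)
-- ===== Notes on version B (the rewrite author's own statement) =====
-- stated objective: alternative
-- what changed: A canonicalises n into a digit-count tuple and scans the 30 powers of two comparing signatures; B never compares signatures: it backtracks over reorderings of n's digits, building a candidate most-significant digit first from a digit-count pool, pruning branches whose minimal completion exceeds 2**29, and recognising a power of two at a leaf by divisibility of 2**29.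
import Mathlib
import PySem

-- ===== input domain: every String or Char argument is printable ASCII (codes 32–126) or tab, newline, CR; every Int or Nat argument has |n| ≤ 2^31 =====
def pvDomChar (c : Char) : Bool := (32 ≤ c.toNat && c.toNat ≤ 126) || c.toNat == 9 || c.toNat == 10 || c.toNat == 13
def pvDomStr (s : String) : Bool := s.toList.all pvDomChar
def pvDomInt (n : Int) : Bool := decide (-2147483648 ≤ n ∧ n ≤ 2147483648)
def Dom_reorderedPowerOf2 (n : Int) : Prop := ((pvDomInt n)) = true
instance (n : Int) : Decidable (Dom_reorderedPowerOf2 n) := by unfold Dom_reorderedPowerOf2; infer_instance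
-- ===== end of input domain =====

-- B replaces A's signature scan (digit-count tuple of n compared against each of the 30 powers
-- of two) by a pruned backtracking search over reorderings of n's digits, testing a completed
-- candidate by divisibility of 2^29.

-- ===== PORT A =====
-- while num > 0: counts[num % 10] += 1; num //= 10   (index num % 10 is in [0,10), so set/getD is exact)
def pvCountLoop (num : Int) (counts : List Int) : List Int :=
  if 0 < num then
    pvCountLoop (PySem.Int.floordiv num 10)
      (counts.set (PySem.Int.mod num 10).toNat (counts.getD (PySem.Int.mod num 10).toNat 0 + 1))
  else counts
termination_by num.toNat
decreasing_by
  rename_i h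
  have h10 : (0:Int) < 10 := by norm_num
  have := PySem.Int.floordiv_eq_ediv_of_pos (a := num) h10
  omega

-- count_digits: Python's 10-tuple is represented as the length-10 list `counts` it freezes
def pvCountDigits (num : Int) : List Int :=
  if num == 0 then (List.replicate 10 (0:Int)).set 0 1
  else pvCountLoop num (List.replicate 10 (0:Int))

def reorderedPowerOf2 (n : Int) : Bool :=
  let nCounts := pvCountDigits n
  (PySem.List.pyRange 0 30 1).any (fun i => pvCountDigits ((1:Int) <<< i.toNat) == nCounts)

-- ===== PORT B =====
-- while m > 0: counts[m % 10] += 1; total += 1; m //= 10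
def pvTallyLoop (m : Int) (counts : List Int) (total : Nat) : List Int × Nat :=
  if 0 < m then
    pvTallyLoop (PySem.Int.floordiv m 10)
      (counts.set (PySem.Int.mod m 10).toNat (counts.getD (PySem.Int.mod m 10).toNat 0 + 1))
      (total + 1)
  else (counts, total)
termination_by m.toNat
decreasing_by
  rename_i h
  have h10 : (0:Int) < 10 := by norm_num
  have := PySem.Int.floordiv_eq_ediv_of_pos (a := m) h10
  omega

-- dfs(rem, acc): build a candidate most-significant digit first from the digit pool `counts`
-- (acc carried functionally; the Python mutates counts and restores it around each recursive call)
def pvDfs (counts : List Int) (rem : Nat) (acc : Int) : Bool :=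
  if acc * (10:Int) ^ rem > ((1:Int) <<< 29) then false
  else
    match rem with
    | 0 => PySem.Int.mod ((1:Int) <<< 29) acc == 0
    | r + 1 =>
      (List.range 10).any (fun d =>
        (counts.getD d 0 != 0) && ((acc != 0) || (d != 0)) &&
          pvDfs (counts.set d (counts.getD d 0 - 1)) r (acc * 10 + (d : Int)))
termination_by rem

def reorderedPowerOf2_alt (n : Int) : Bool :=
  if n ≤ 0 then false
  else
    let ct := pvTallyLoop n (List.replicate 10 (0:Int)) 0
    pvDfs ct.1 ct.2 0

-- ===== PRECONDITION & SPEC =====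
def Spec_reorderedPowerOf2 (n : Int) (out : Bool) : Prop := out = reorderedPowerOf2_alt n
instance (n : Int) (out : Bool) : Decidable (Spec_reorderedPowerOf2 n out) := by unfold Spec_reorderedPowerOf2; infer_instance

-- ===== CLAIM (what is proved, stated in full; the proofs are below) =====
def Claim_equal_reorderedPowerOf2 : Prop := ∀ (n : Int), Dom_reorderedPowerOf2 n → Spec_reorderedPowerOf2 n (reorderedPowerOf2 n)

-- ===== LEMMAS AND PROOFS =====

theorem floordiv10_toNat_lt {num : Int} (h : 0 < num) :
    (PySem.Int.floordiv num 10).toNat < num.toNat := by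
  have h10 : (0:Int) < 10 := by norm_num
  have := PySem.Int.floordiv_eq_ediv_of_pos (a := num) h10
  omega

-- proof-side view of a number as its list of digits, least significant first
def pvDigitLoop (num : Int) (digits : List Int) : List Int :=
  if 0 < num then
    pvDigitLoop (PySem.Int.floordiv num 10) (digits ++ [PySem.Int.mod num 10])
  else digits
termination_by num.toNat
decreasing_by exact floordiv10_toNat_lt (by assumption)

theorem pvDigitLoop_step {num : Int} (h : 0 < num) (acc : List Int) :
    pvDigitLoop num acc = pvDigitLoop (PySem.Int.floordiv num 10) (acc ++ [PySem.Int.mod num 10]) := by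
  rw [pvDigitLoop, if_pos h]

theorem pvDigitLoop_append_aux : ∀ (k : Nat) (num : Int), num.toNat ≤ k →
    ∀ acc : List Int, pvDigitLoop num acc = acc ++ pvDigitLoop num [] := by
  intro k
  induction k with
  | zero =>
      intro num hk acc
      have h : ¬ 0 < num := by omega
      rw [pvDigitLoop, if_neg h, pvDigitLoop, if_neg h, List.append_nil]
  | succ k ih =>
      intro num hk acc
      by_cases h : 0 < num
      · have hlt : (PySem.Int.floordiv num 10).toNat ≤ k := by
          have := floordiv10_toNat_lt h; omega
        rw [pvDigitLoop_step h acc, pvDigitLoop_step h [],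
          ih _ hlt (acc ++ [PySem.Int.mod num 10]), ih _ hlt ([] ++ [PySem.Int.mod num 10])]
        simp
      · rw [pvDigitLoop, if_neg h, pvDigitLoop, if_neg h, List.append_nil]

theorem pvDigitLoop_append (num : Int) (acc : List Int) :
    pvDigitLoop num acc = acc ++ pvDigitLoop num [] :=
  pvDigitLoop_append_aux num.toNat num le_rfl acc

theorem pvDigitLoop_nonpos {num : Int} (h : ¬ 0 < num) : pvDigitLoop num [] = [] := by
  rw [pvDigitLoop, if_neg h]

theorem pvDigitLoop_pos {num : Int} (h : 0 < num) :
    pvDigitLoop num [] = PySem.Int.mod num 10 :: pvDigitLoop (PySem.Int.floordiv num 10) [] := by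
  rw [pvDigitLoop, if_pos h, pvDigitLoop_append]; simp

-- every collected digit is in [0,10)
theorem pvDigitLoop_mem_aux : ∀ (num : Int) (digits : List Int) (d : Int),
    d ∈ pvDigitLoop num digits → d ∈ digits ∨ (0 ≤ d ∧ d < 10) := by
  intro num digits
  induction num, digits using pvDigitLoop.induct with
  | case1 num digits h ih =>
      intro d hd
      rw [pvDigitLoop, if_pos h] at hd
      rcases ih d hd with hm | hb
      · rcases List.mem_append.mp hm with hm | hm
        · exact Or.inl hm
        · simp only [List.mem_singleton] at hm
          subst hm
          exact Or.inr ⟨PySem.Int.mod_nonneg _ (by norm_num), PySem.Int.mod_lt _ (by norm_num)⟩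
      · exact Or.inr hb
  | case2 num digits h =>
      intro d hd
      rw [pvDigitLoop, if_neg h] at hd
      exact Or.inl hd

theorem pvDigitLoop_mem {num : Int} {d : Int} (hd : d ∈ pvDigitLoop num []) : 0 ≤ d ∧ d < 10 := by
  rcases pvDigitLoop_mem_aux num [] d hd with h | h
  · cases h
  · exact h

theorem pvCountLoop_length : ∀ (num : Int) (counts : List Int),
    (pvCountLoop num counts).length = counts.length := by
  intro num counts
  induction num, counts using pvCountLoop.induct with
  | case1 num counts h ih => rw [pvCountLoop, if_pos h, ih]; simp
  | case2 num counts h => rw [pvCountLoop, if_neg h]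

-- the count loop computes, componentwise, the digit multiplicities of the digit list
theorem pvCountLoop_getD : ∀ (num : Int) (counts : List Int) (j : Nat), j < counts.length →
    (pvCountLoop num counts).getD j 0
      = counts.getD j 0 + ((pvDigitLoop num []).count ((j : Nat) : Int) : Int) := by
  intro num counts
  induction num, counts using pvCountLoop.induct with
  | case1 num counts h ih =>
      intro j hj
      have hm0 : (0:Int) ≤ PySem.Int.mod num 10 := PySem.Int.mod_nonneg _ (by norm_num)
      have hm10 : PySem.Int.mod num 10 < 10 := PySem.Int.mod_lt _ (by norm_num)
      set m := (PySem.Int.mod num 10).toNat with hm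
      have hmc : ((m : Nat) : Int) = PySem.Int.mod num 10 := Int.toNat_of_nonneg hm0
      rw [pvCountLoop, if_pos h, pvDigitLoop_pos h, ih j (by simpa using hj)]
      have hset : (counts.set m (counts.getD m 0 + 1)).getD j 0
          = counts.getD j 0 + (if ((j:Nat):Int) = PySem.Int.mod num 10 then 1 else 0) := by
        by_cases hjm : j = m
        · subst hjm
          rw [List.getD_eq_getElem _ _ (by simpa using hj), List.getElem_set_self,
            List.getD_eq_getElem _ _ hj, if_pos hmc]
        · rw [List.getD_eq_getElem _ _ (by simpa using hj), List.getElem_set_ne (by omega),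
            List.getD_eq_getElem _ _ hj,
            if_neg (by rw [← hmc]; exact_mod_cast fun e => hjm (by exact_mod_cast e))]
          omega
      rw [hset, List.count_cons]
      by_cases hc : ((j : Nat) : Int) = PySem.Int.mod num 10
      · simp only [hc, beq_self_eq_true, if_true]
        push_cast; ring
      · have hc'' : (PySem.Int.mod num 10 == ((j : Nat) : Int)) = false :=
          beq_eq_false_iff_ne.mpr (Ne.symm hc)
        simp only [if_neg hc, hc'', Bool.false_eq_true, if_false]
        push_cast; ring
  | case2 num counts h =>
      intro j hj
      rw [pvCountLoop, if_neg h, pvDigitLoop_nonpos h]; simp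

theorem pvCountLoop_nonpos {num : Int} (h : ¬ 0 < num) (counts : List Int) :
    pvCountLoop num counts = counts := by
  rw [pvCountLoop, if_neg h]

theorem list_eq_of_getD (l1 l2 : List Int) (h1 : l1.length = 10) (h2 : l2.length = 10)
    (h : ∀ j : Nat, j < 10 → l1.getD j 0 = l2.getD j 0) : l1 = l2 := by
  apply List.ext_getElem (by omega)
  intro j hj _
  have := h j (by omega)
  rwa [List.getD_eq_getElem _ _ (by omega), List.getD_eq_getElem _ _ (by omega)] at this

-- the bridge: for positive inputs, equal count tuples ↔ digit lists are permutations
theorem bridge {a b : Int} (ha : 0 < a) (hb : 0 < b) :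
    (pvCountDigits a = pvCountDigits b) ↔ (pvDigitLoop a []).Perm (pvDigitLoop b []) := by
  have hca : pvCountDigits a = pvCountLoop a (List.replicate 10 (0:Int)) := by
    unfold pvCountDigits; rw [if_neg (by simpa using ha.ne')]
  have hcb : pvCountDigits b = pvCountLoop b (List.replicate 10 (0:Int)) := by
    unfold pvCountDigits; rw [if_neg (by simpa using hb.ne')]
  constructor
  · intro h
    have hab : pvCountLoop a (List.replicate 10 (0:Int))
        = pvCountLoop b (List.replicate 10 (0:Int)) := by rw [← hca, ← hcb]; exact h
    rw [List.perm_iff_count]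
    intro d
    by_cases hd : 0 ≤ d ∧ d < 10
    · have hdj : d = ((d.toNat : Nat) : Int) := (Int.toNat_of_nonneg hd.1).symm
      have h1 := pvCountLoop_getD a (List.replicate 10 (0:Int)) d.toNat (by simp; omega)
      have h2 := pvCountLoop_getD b (List.replicate 10 (0:Int)) d.toNat (by simp; omega)
      rw [hab] at h1
      have : ((pvDigitLoop a []).count ((d.toNat : Nat) : Int) : Int)
          = ((pvDigitLoop b []).count ((d.toNat : Nat) : Int) : Int) := by omega
      rw [hdj]; exact_mod_cast this
    · rw [List.count_eq_zero.2 (fun hm => hd (pvDigitLoop_mem hm)),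
        List.count_eq_zero.2 (fun hm => hd (pvDigitLoop_mem hm))]
  · intro h
    rw [hca, hcb]
    apply list_eq_of_getD _ _ (by rw [pvCountLoop_length]; simp) (by rw [pvCountLoop_length]; simp)
    intro j hj
    rw [pvCountLoop_getD _ _ j (by simpa using hj), pvCountLoop_getD _ _ j (by simpa using hj),
      (List.perm_iff_count.mp h) ((j : Nat) : Int)]

theorem shift_pos (i : Int) : (0:Int) < (1:Int) <<< i.toNat := by
  rw [Int.shiftLeft_eq]
  positivity

-- pvCountDigits on 0 / nonzero, unfolded
theorem pvCountDigits_zero : pvCountDigits 0 = (List.replicate 10 (0:Int)).set 0 1 := rfl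

theorem pvCountDigits_of_ne {num : Int} (h : num ≠ 0) :
    pvCountDigits num = pvCountLoop num (List.replicate 10 (0:Int)) := by
  unfold pvCountDigits
  rw [if_neg (by simpa using h)]

-- a positive number's count tuple is never the all-zeros tuple (n < 0 in A)
theorem pvCountLoop_ne_zeros {num : Int} (h : 0 < num) :
    pvCountLoop num (List.replicate 10 (0:Int)) ≠ List.replicate 10 (0:Int) := by
  intro he
  have hm0 : (0:Int) ≤ PySem.Int.mod num 10 := PySem.Int.mod_nonneg _ (by norm_num)
  have hm10 : PySem.Int.mod num 10 < 10 := PySem.Int.mod_lt _ (by norm_num)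
  set m := (PySem.Int.mod num 10).toNat with hm
  have hmc : ((m : Nat) : Int) = PySem.Int.mod num 10 := Int.toNat_of_nonneg hm0
  have hmem : PySem.Int.mod num 10 ∈ pvDigitLoop num [] := by
    rw [pvDigitLoop_pos h]; exact List.mem_cons_self ..
  have hcnt : 0 < (pvDigitLoop num []).count ((m : Nat) : Int) :=
    List.count_pos_iff.mpr (hmc ▸ hmem)
  have hgd := pvCountLoop_getD num (List.replicate 10 (0:Int)) m (by simp; omega)
  have hz : (List.replicate 10 (0:Int)).getD m 0 = 0 := by
    rw [List.getD_eq_getElem _ _ (by simp; omega), List.getElem_replicate]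
  rw [he, hz] at hgd
  omega

-- a positive number's count tuple is never count_digits(0) = (1,0,…,0) (n = 0 in A)
theorem pvCountLoop_ne_zeroTuple {num : Int} (h : 0 < num) :
    pvCountLoop num (List.replicate 10 (0:Int)) ≠ (List.replicate 10 (0:Int)).set 0 1 := by
  intro he
  have hrhs : ∀ j : Nat, j < 10 →
      ((List.replicate 10 (0:Int)).set 0 1).getD j 0 = if j = 0 then 1 else 0 := by
    intro j hj
    by_cases hj0 : j = 0
    · subst hj0
      rw [List.getD_eq_getElem _ _ (by simp), List.getElem_set_self, if_pos rfl]
    · rw [List.getD_eq_getElem _ _ (by simp; omega), List.getElem_set_ne (by omega),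
        List.getElem_replicate, if_neg hj0]
  have hcnt : ∀ j : Nat, j < 10 →
      ((pvDigitLoop num []).count ((j : Nat) : Int) : Int) = if j = 0 then 1 else 0 := by
    intro j hj
    have hgd := pvCountLoop_getD num (List.replicate 10 (0:Int)) j (by simp; omega)
    have hz : (List.replicate 10 (0:Int)).getD j 0 = 0 := by
      rw [List.getD_eq_getElem _ _ (by simp; omega), List.getElem_replicate]
    rw [he, hrhs j hj, hz] at hgd
    omega
  have hall : ∀ d ∈ pvDigitLoop num [], (0:Int) = d := by
    intro d hd
    rcases pvDigitLoop_mem hd with ⟨hd0, hd10⟩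
    by_contra hne
    have hj : d.toNat < 10 := by omega
    have hj0 : d.toNat ≠ 0 := by omega
    have hc1 := hcnt d.toNat hj
    rw [if_neg hj0, Int.toNat_of_nonneg hd0] at hc1
    have hc2 := List.count_pos_iff.mpr hd
    omega
  have hlen1 : (pvDigitLoop num []).length = 1 := by
    have := (List.count_eq_length (a := (0:Int)) (l := pvDigitLoop num [])).mpr hall
    have h0 := hcnt 0 (by omega)
    rw [if_pos rfl, Nat.cast_zero] at h0
    omega
  have hmod0 : PySem.Int.mod num 10 = 0 := by
    have hmem : PySem.Int.mod num 10 ∈ pvDigitLoop num [] := by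
      rw [pvDigitLoop_pos h]; exact List.mem_cons_self ..
    exact (hall _ hmem).symm
  have hquot : ¬ 0 < PySem.Int.floordiv num 10 := by
    intro hq
    rw [pvDigitLoop_pos h, pvDigitLoop_pos hq] at hlen1
    simp at hlen1
  have hlt : num < 10 := by
    have := (PySem.Int.floordiv_lt_iff_lt_mul (a := num) (b := 10) (q := 1) (by norm_num)).mp
      (by omega)
    omega
  have : PySem.Int.mod num 10 = num := by
    rw [PySem.Int.mod_eq_emod_of_pos (by norm_num), Int.emod_eq_of_lt (by omega) (by omega)]
  omega

-- A returns false for n ≤ 0: the scan finds no match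
theorem main_nonpos {n : Int} (hn : ¬ 0 < n) : reorderedPowerOf2 n = false := by
  unfold reorderedPowerOf2
  simp only [List.any_eq_false, beq_iff_eq]
  intro i _
  rw [pvCountDigits_of_ne (shift_pos i).ne']
  by_cases h0 : n = 0
  · subst h0
    rw [pvCountDigits_zero]
    exact pvCountLoop_ne_zeroTuple (shift_pos i)
  · rw [pvCountDigits_of_ne h0, pvCountLoop_nonpos hn]
    exact pvCountLoop_ne_zeros (shift_pos i)

----------------------------------------------------------------
-- B-side analysis
----------------------------------------------------------------

-- value of a most-significant-first digit string appended to acc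
def pvVal (acc : Int) (ds : List Int) : Int := ds.foldl (fun a d => a * 10 + d) acc

-- B's tally loop is A's count loop plus the number of digits
theorem pvTallyLoop_spec : ∀ (m : Int) (counts : List Int) (total : Nat),
    pvTallyLoop m counts total = (pvCountLoop m counts, total + (pvDigitLoop m []).length) := by
  intro m counts total
  induction m, counts, total using pvTallyLoop.induct with
  | case1 m counts total h ih =>
      rw [pvTallyLoop, if_pos h, ih]
      conv_rhs => rw [pvCountLoop, if_pos h, pvDigitLoop_pos h]
      simp [Nat.add_comm, Nat.add_left_comm]
  | case2 m counts total h =>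
      rw [pvTallyLoop, if_neg h]
      conv_rhs => rw [pvCountLoop, if_neg h, pvDigitLoop_nonpos h]
      simp

theorem pvVal_cons (acc d : Int) (ds : List Int) :
    pvVal acc (d :: ds) = pvVal (acc * 10 + d) ds := rfl

-- lower bound: completing acc with |ds| digits yields at least acc * 10^|ds|
theorem pvVal_lower : ∀ (ds : List Int) (acc : Int), 0 ≤ acc → (∀ d ∈ ds, 0 ≤ d) →
    acc * 10 ^ ds.length ≤ pvVal acc ds := by
  intro ds
  induction ds with
  | nil => intro acc _ _; simp [pvVal]
  | cons d t ih =>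
      intro acc hacc hb
      have hd : 0 ≤ d := hb d (List.mem_cons_self ..)
      have h1 : 0 ≤ acc * 10 + d := by nlinarith
      have h2 := ih (acc * 10 + d) h1 (fun x hx => hb x (List.mem_cons_of_mem _ hx))
      rw [pvVal_cons]
      calc acc * 10 ^ (d :: t).length = (acc * 10) * 10 ^ t.length := by
            rw [List.length_cons, pow_succ]; ring
        _ ≤ (acc * 10 + d) * 10 ^ t.length := by
            have : (0:Int) ≤ 10 ^ t.length := by positivity
            nlinarith
        _ ≤ pvVal (acc * 10 + d) t := h2

-- digits of a value rebuilt from digits: pvDigitLoop (pvVal acc ds) = ds.reverse ++ digits acc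
theorem pvDigits_val : ∀ (ds : List Int), (∀ d ∈ ds, 0 ≤ d ∧ d < 10) →
    ∀ acc : Int, 0 < acc →
    pvDigitLoop (pvVal acc ds) [] = ds.reverse ++ pvDigitLoop acc [] := by
  intro ds
  induction ds with
  | nil => intro _ acc _; simp [pvVal]
  | cons d t ih =>
      intro hb acc hacc
      obtain ⟨hd0, hd10⟩ := hb d (List.mem_cons_self ..)
      have hacc' : 0 < acc * 10 + d := by nlinarith
      rw [pvVal_cons, ih (fun x hx => hb x (List.mem_cons_of_mem _ hx)) _ hacc']
      have hmod : PySem.Int.mod (acc * 10 + d) 10 = d := by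
        rw [PySem.Int.mod_eq_emod_of_pos (by norm_num)]
        omega
      have hdiv : PySem.Int.floordiv (acc * 10 + d) 10 = acc := by
        rw [PySem.Int.floordiv_eq_iff_of_pos (by norm_num)]
        constructor <;> nlinarith
      rw [pvDigitLoop_pos hacc', hmod, hdiv]
      simp

-- digits of a single digit 0 < h < 10
theorem pvDigits_single {h : Int} (h0 : 0 < h) (h10 : h < 10) : pvDigitLoop h [] = [h] := by
  have hmod : PySem.Int.mod h 10 = h := by
    rw [PySem.Int.mod_eq_emod_of_pos (by norm_num)]; omega
  have hdiv : PySem.Int.floordiv h 10 = 0 := by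
    rw [PySem.Int.floordiv_eq_iff_of_pos (by norm_num)]; omega
  rw [pvDigitLoop_pos h0, hmod, hdiv, pvDigitLoop_nonpos (by norm_num)]

-- rebuilding a number from its digits
theorem pvVal_digits : ∀ (k : Nat) (num : Int), num.toNat ≤ k → 0 ≤ num →
    pvVal 0 (pvDigitLoop num []).reverse = num := by
  intro k
  induction k with
  | zero =>
      intro num hk h0
      have : ¬ 0 < num := by omega
      rw [pvDigitLoop_nonpos this]
      simp [pvVal]; omega
  | succ k ih =>
      intro num hk h0
      by_cases h : 0 < num
      · have hq0 : 0 ≤ PySem.Int.floordiv num 10 := by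
          have := PySem.Int.floordiv_eq_ediv_of_pos (a := num) (b := 10) (by norm_num)
          rw [this]
          exact Int.ediv_nonneg (by omega) (by norm_num)
        have hqk : (PySem.Int.floordiv num 10).toNat ≤ k := by
          have := floordiv10_toNat_lt h; omega
        rw [pvDigitLoop_pos h]
        simp only [List.reverse_cons]
        have := ih (PySem.Int.floordiv num 10) hqk hq0
        unfold pvVal at this ⊢
        rw [List.foldl_append, this]
        simp only [List.foldl_cons, List.foldl_nil]
        have := PySem.Int.floordiv_mul_add_mod num 10
        omega
      · rw [pvDigitLoop_nonpos h]; simp [pvVal]; omega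

-- the most significant digit of a positive number is nonzero
theorem pvDigits_msd : ∀ (k : Nat) (num : Int), num.toNat ≤ k → 0 < num →
    ∀ l, (pvDigitLoop num []).getLast? = some l → 0 < l := by
  intro k
  induction k with
  | zero => intro num hk h; omega
  | succ k ih =>
      intro num hk h l hl
      rw [pvDigitLoop_pos h] at hl
      by_cases hq : 0 < PySem.Int.floordiv num 10
      · have hqk : (PySem.Int.floordiv num 10).toNat ≤ k := by
          have := floordiv10_toNat_lt h; omega
        rw [pvDigitLoop_pos hq, List.getLast?_cons_cons, ← pvDigitLoop_pos hq] at hl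
        exact ih _ hqk hq l hl
      · rw [pvDigitLoop_nonpos hq] at hl
        simp only [List.getLast?_singleton, Option.some.injEq] at hl
        subst hl
        have hlt : num < 10 := by
          have := (PySem.Int.floordiv_lt_iff_lt_mul (a := num) (b := 10) (q := 1)
            (by norm_num)).mp (by omega)
          omega
        have : PySem.Int.mod num 10 = num := by
          rw [PySem.Int.mod_eq_emod_of_pos (by norm_num), Int.emod_eq_of_lt (by omega) (by omega)]
        omega

-- the leaf test: "candidate ≤ 2^29 and divides 2^29"
def pvGood (v : Int) : Prop := v ≤ ((1:Int) <<< 29) ∧ PySem.Int.mod ((1:Int) <<< 29) v = 0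

theorem pow229 : ((1:Int) <<< 29) = 2 ^ 29 := by decide

theorem pvGood_iff {v : Int} (hv : 0 < v) : pvGood v ↔ ∃ i : Nat, i < 30 ∧ v = 2 ^ i := by
  unfold pvGood
  rw [pow229, PySem.Int.mod_eq_zero_iff_dvd]
  constructor
  · rintro ⟨-, hdvd⟩
    have hvn : v = (v.toNat : Int) := (Int.toNat_of_nonneg (by omega)).symm
    have : (v.toNat : Int) ∣ ((2 ^ 29 : Nat) : Int) := by push_cast; rw [← hvn]; exact hdvd
    have hnat : v.toNat ∣ 2 ^ 29 := by exact_mod_cast this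
    obtain ⟨i, hi, he⟩ := (Nat.dvd_prime_pow Nat.prime_two).mp hnat
    exact ⟨i, by omega, by rw [hvn, he]; push_cast; ring⟩
  · rintro ⟨i, hi, rfl⟩
    have hd : (2:Int) ^ i ∣ 2 ^ 29 := pow_dvd_pow 2 (by omega)
    exact ⟨Int.le_of_dvd (by positivity) hd, hd⟩

-- the DFS characterisation: with counts describing the multiset L, the search succeeds iff some
-- reordering of L (not starting with 0 when acc = 0) completes acc to a good candidate
theorem pvDfs_iff : ∀ (r : Nat) (L c : List Int) (acc : Int), L.length = r →
    (∀ d ∈ L, 0 ≤ d ∧ d < 10) → c.length = 10 →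
    (∀ j : Nat, j < 10 → c.getD j 0 = (L.count ((j : Nat) : Int) : Int)) → 0 ≤ acc →
    (pvDfs c r acc = true ↔
      ∃ ds : List Int, ds.Perm L ∧ (acc = 0 → ds.head? ≠ some 0) ∧ pvGood (pvVal acc ds)) := by
  intro r
  induction r with
  | zero =>
      intro L c acc hlen hb hc10 hcc hacc
      have hL : L = [] := List.eq_nil_of_length_eq_zero hlen
      subst hL
      rw [pvDfs]
      split_ifs with hp
      · simp only [false_iff]
        rintro ⟨ds, hperm, -, hgood⟩
        have hds : ds = [] := hperm.eq_nil
        subst hds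
        unfold pvGood at hgood
        simp only [pvVal, List.foldl_nil] at hgood
        simp only [pow_zero, mul_one] at hp
        omega
      · simp only [pow_zero, mul_one, not_lt] at hp
        simp only [beq_iff_eq]
        constructor
        · intro h
          exact ⟨[], List.Perm.refl _, by simp, hp, h⟩
        · rintro ⟨ds, hperm, -, hgood⟩
          have hds : ds = [] := hperm.eq_nil
          subst hds
          unfold pvGood at hgood
          simpa [pvVal] using hgood.2
  | succ r ih =>
      intro L c acc hlen hb hc10 hcc hacc
      rw [pvDfs]
      split_ifs with hp
      · -- pruned branch: every completion of acc already exceeds 2^29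
        simp only [false_iff]
        rintro ⟨ds, hperm, -, hgood⟩
        unfold pvGood at hgood
        have hnn : ∀ d ∈ ds, 0 ≤ d := fun d hd => (hb d (hperm.mem_iff.mp hd)).1
        have hlow := pvVal_lower ds acc hacc hnn
        rw [hperm.length_eq, hlen] at hlow
        simp only [Nat.succ_eq_add_one] at hp
        linarith [hgood.1]
      · simp only [List.any_eq_true, List.mem_range, Bool.and_eq_true, bne_iff_ne, ne_eq,
          Bool.or_eq_true]
        constructor
        · rintro ⟨d, hd10, ⟨hcd, hz⟩, hrec⟩
          have hcnt : L.count ((d : Nat) : Int) ≠ 0 := by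
            intro h0
            rw [hcc d hd10, h0] at hcd
            exact hcd rfl
          have hdL : ((d : Nat) : Int) ∈ L := List.count_pos_iff.mp (Nat.pos_of_ne_zero hcnt)
          have hlen' : (L.erase ((d : Nat) : Int)).length = r := by
            rw [List.length_erase_of_mem hdL, hlen]
            omega
          have hb' : ∀ x ∈ L.erase ((d : Nat) : Int), 0 ≤ x ∧ x < 10 :=
            fun x hx => hb x (List.mem_of_mem_erase hx)
          have hc10' : (c.set d (c.getD d 0 - 1)).length = 10 := by simp [hc10]
          have hcc' : ∀ j : Nat, j < 10 →
              (c.set d (c.getD d 0 - 1)).getD j 0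
                = ((L.erase ((d : Nat) : Int)).count ((j : Nat) : Int) : Int) := by
            intro j hj
            by_cases hjd : j = d
            · subst hjd
              rw [List.getD_eq_getElem _ _ (by simp [hc10]; omega), List.getElem_set_self,
                List.count_erase_self, hcc j hj]
              have : 0 < L.count ((j : Nat) : Int) := Nat.pos_of_ne_zero hcnt
              omega
            · have hgj := hcc j hj
              rw [List.getD_eq_getElem _ _ (by omega)] at hgj
              rw [List.getD_eq_getElem _ _ (by simp [hc10]; omega),
                List.getElem_set_ne (by omega), hgj,
                List.count_erase_of_ne (by exact_mod_cast fun e => hjd (by exact_mod_cast e))]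
          have hacc' : (0:Int) ≤ acc * 10 + (d : Nat) := by
            have : (0:Int) ≤ ((d : Nat) : Int) := Int.natCast_nonneg d
            omega
          obtain ⟨ds', hperm', -, hgood'⟩ :=
            (ih _ _ _ hlen' hb' hc10' hcc' hacc').mp hrec
          refine ⟨((d : Nat) : Int) :: ds',
            (List.cons_perm_iff_perm_erase.mpr ⟨hdL, hperm'⟩), ?_, ?_⟩
          · intro hacc0
            rcases hz with hz | hz
            · exact absurd hacc0 hz
            · simp only [List.head?_cons, Option.some.injEq]
              exact_mod_cast hz
          · rw [pvVal_cons]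
            exact hgood'
        · rintro ⟨ds, hperm, hhead, hgood⟩
          have hne : ds ≠ [] := by
            intro h0
            rw [h0] at hperm
            have := hperm.length_eq
            rw [hlen] at this
            simp at this
          obtain ⟨d0, t, rfl⟩ := List.exists_cons_of_ne_nil hne
          obtain ⟨hd0L, hpt⟩ := List.cons_perm_iff_perm_erase.mp hperm
          obtain ⟨hd00, hd010⟩ := hb d0 hd0L
          have hcast : ((d0.toNat : Nat) : Int) = d0 := Int.toNat_of_nonneg hd00
          have hd10 : d0.toNat < 10 := by omega
          have hd0ne0 : acc = 0 → d0 ≠ 0 := by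
            intro hacc0 he
            have := hhead hacc0
            simp only [List.head?_cons, Option.some.injEq] at this
            exact this he
          refine ⟨d0.toNat, hd10, ⟨?_, ?_⟩, ?_⟩
          · rw [hcc d0.toNat hd10, hcast]
            have : 0 < L.count d0 := List.count_pos_iff.mpr hd0L
            exact_mod_cast this.ne'
          · by_cases hacc0 : acc = 0
            · exact Or.inr (fun he => hd0ne0 hacc0 (by omega))
            · exact Or.inl hacc0
          · have hacc' : (0:Int) ≤ acc * 10 + (d0.toNat : Nat) := by
              rw [hcast]; omega
            have haccpos : (0:Int) < acc * 10 + (d0.toNat : Nat) := by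
              rw [hcast]
              by_cases hacc0 : acc = 0
              · have := hd0ne0 hacc0
                omega
              · have : 1 ≤ acc := by omega
                omega
            have hlen' : (L.erase ((d0.toNat : Nat) : Int)).length = r := by
              rw [hcast, List.length_erase_of_mem hd0L, hlen]
              omega
            have hb' : ∀ x ∈ L.erase ((d0.toNat : Nat) : Int), 0 ≤ x ∧ x < 10 :=
              fun x hx => hb x (List.mem_of_mem_erase hx)
            have hcc' : ∀ j : Nat, j < 10 →
                (c.set d0.toNat (c.getD d0.toNat 0 - 1)).getD j 0
                  = ((L.erase ((d0.toNat : Nat) : Int)).count ((j : Nat) : Int) : Int) := by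
              intro j hj
              by_cases hjd : j = d0.toNat
              · rw [hjd, List.getD_eq_getElem _ _ (by simp [hc10]; omega), List.getElem_set_self,
                  List.count_erase_self, hcc d0.toNat hd10]
                have : 0 < L.count ((d0.toNat : Nat) : Int) := by
                  rw [hcast]
                  exact List.count_pos_iff.mpr hd0L
                omega
              · have hgj := hcc j hj
                rw [List.getD_eq_getElem _ _ (by omega)] at hgj
                rw [List.getD_eq_getElem _ _ (by simp [hc10]; omega),
                  List.getElem_set_ne (by omega), hgj,
                  List.count_erase_of_ne (by exact_mod_cast fun e => hjd (by exact_mod_cast e))]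
            refine (ih _ _ _ hlen' hb' (by simp [hc10]) hcc' hacc').mpr
              ⟨t, by rw [hcast]; exact hpt, ?_, ?_⟩
            · intro h0
              rw [h0] at haccpos
              exact absurd haccpos (by omega)
            · rw [hcast, ← pvVal_cons]
              exact hgood

-- A's scan equals B's backtracking search, for positive n
theorem main_pos {n : Int} (hn : 0 < n) : reorderedPowerOf2 n = reorderedPowerOf2_alt n := by
  unfold reorderedPowerOf2_alt
  rw [if_neg (by omega)]
  rw [pvTallyLoop_spec]
  simp only [Nat.zero_add]
  have hiff := pvDfs_iff (pvDigitLoop n []).length (pvDigitLoop n [])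
    (pvCountLoop n (List.replicate 10 (0:Int))) 0 rfl
    (fun d hd => pvDigitLoop_mem hd)
    (by rw [pvCountLoop_length]; simp)
    (fun j hj => by
      rw [pvCountLoop_getD _ _ j (by simpa using hj),
        List.getD_eq_getElem _ _ (by simpa using hj), List.getElem_replicate]
      simp)
    le_rfl
  rw [Bool.eq_iff_iff, hiff]
  unfold reorderedPowerOf2
  simp only [List.any_eq_true, beq_iff_eq]
  constructor
  · rintro ⟨i, hi, hc⟩
    rw [PySem.List.mem_pyRange_one] at hi
    have hpos := shift_pos i
    have hperm := (bridge hpos hn).mp hc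
    refine ⟨(pvDigitLoop ((1:Int) <<< i.toNat) []).reverse,
      (List.reverse_perm _).trans hperm, ?_, ?_⟩
    · intro _
      rw [List.head?_reverse]
      intro heq
      have := pvDigits_msd ((1:Int) <<< i.toNat).toNat _ le_rfl hpos 0 heq
      omega
    · rw [pvVal_digits ((1:Int) <<< i.toNat).toNat _ le_rfl (le_of_lt hpos)]
      rw [pvGood_iff hpos]
      refine ⟨i.toNat, by omega, ?_⟩
      rw [Int.shiftLeft_eq]
      ring
  · rintro ⟨ds, hperm, hhead, hgood⟩
    have hdn : pvDigitLoop n [] ≠ [] := by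
      rw [pvDigitLoop_pos hn]; simp
    have hne : ds ≠ [] := by
      intro h0
      rw [h0] at hperm
      exact hdn hperm.symm.eq_nil
    obtain ⟨h, t, rfl⟩ := List.exists_cons_of_ne_nil hne
    obtain ⟨hh0, hh10⟩ := pvDigitLoop_mem (hperm.mem_iff.mp (List.mem_cons_self ..))
    have hhne : h ≠ 0 := by
      have hh := hhead (by simp)
      simp only [List.head?_cons] at hh
      intro he
      exact hh (by rw [he])
    have hhpos : 0 < h := by omega
    have hbt : ∀ d ∈ t, 0 ≤ d ∧ d < 10 :=
      fun d hd => pvDigitLoop_mem (hperm.mem_iff.mp (List.mem_cons_of_mem _ hd))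
    have hv : pvVal 0 (h :: t) = pvVal h t := by
      rw [pvVal_cons]; norm_num
    have hdigv : pvDigitLoop (pvVal 0 (h :: t)) [] = (h :: t).reverse := by
      rw [hv, pvDigits_val t hbt h hhpos, pvDigits_single hhpos hh10]
      simp
    have hvpos : 0 < pvVal 0 (h :: t) := by
      by_contra hc
      rw [pvDigitLoop_nonpos hc] at hdigv
      simp at hdigv
    obtain ⟨i, hi30, hieq⟩ := (pvGood_iff hvpos).mp hgood
    refine ⟨(i : Int), ?_, ?_⟩
    · rw [PySem.List.mem_pyRange_one]
      constructor <;> [positivity; exact_mod_cast hi30]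
    · rw [bridge (shift_pos (i:Int)) hn]
      have hsh : ((1:Int) <<< ((i:Int)).toNat) = pvVal 0 (h :: t) := by
        rw [Int.shiftLeft_eq, hieq]
        simp
      rw [hsh, hdigv]
      exact (List.reverse_perm _).trans hperm

-- ===== VERDICT (by name: the statement is the Claim_ definition above) =====
theorem reorderedPowerOf2_spec : Claim_equal_reorderedPowerOf2 := by
  intro n _
  unfold Spec_reorderedPowerOf2
  by_cases hn : 0 < n
  · exact main_pos hn
  · rw [main_nonpos hn]
    unfold reorderedPowerOf2_alt
    rw [if_pos (by omega)]
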